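-- pv_equiv track=rewrite | github.com/Jame-Artifact-Zero/artifact-zero-gateway | f500_scraper_v3.py | classify_link
-- ===== SOURCE A (Python) =====
-- CORPORATE_KEYWORDS = {
--     "sustainability": ["sustainability", "sustainable", "esg", "environment", "climate", "carbon", "impact", "responsibility", "responsible", "csr", "social impact"],
--     "investor-relations": ["investor", "investors", "shareholder", "annual report", "financial", "earnings", "ir "],
--     "newsroom": ["newsroom", "press", "media", "press release", "news room", "news"],
--     "values": ["values", "purpose", "mission", "culture", "principles", "commitment", "our purpose"],
--     "about": ["about", "our story", "who we are", "our company", "company overview", "history", "company profile"],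
--     "leadership": ["leadership", "team", "executives", "management", "board", "directors", "our people", "our management"],
--     "careers": ["careers", "jobs", "join us", "work with us", "life at", "hiring"],
--     "ceo-letter": ["ceo", "chairman", "letter to shareholders", "annual report", "message from"],
-- }
--
-- def classify_link(text, href):
--     """Classify a link by its text and URL. Returns (page_type, confidence)."""
--     text_lower = (text or "").lower().strip()
--     href_lower = (href or "").lower()
--     best_type, best_score = None, 0
--
--     for ptype, keywords in CORPORATE_KEYWORDS.items():
--         for kw in keywords:
--             score = 0
--             if kw in text_lower:
--                 score = 3  # Text match is strongest
--             elif kw in href_lower: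
--                 score = 2  # URL match is good
--             if score > best_score:
--                 best_score = score
--                 best_type = ptype
--
--     return best_type, best_score
-- ===== SOURCE B (Python) =====
-- CORPORATE_KEYWORDS = {
--     "sustainability": ["sustainability", "sustainable", "esg", "environment", "climate", "carbon", "impact", "responsibility", "responsible", "csr", "social impact"],
--     "investor-relations": ["investor", "investors", "shareholder", "annual report", "financial", "earnings", "ir "],
--     "newsroom": ["newsroom", "press", "media", "press release", "news room", "news"],
--     "values": ["values", "purpose", "mission", "culture", "principles", "commitment", "our purpose"],
--     "about": ["about", "our story", "who we are", "our company", "company overview", "history", "company profile"],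
--     "leadership": ["leadership", "team", "executives", "management", "board", "directors", "our people", "our management"],
--     "careers": ["careers", "jobs", "join us", "work with us", "life at", "hiring"],
--     "ceo-letter": ["ceo", "chairman", "letter to shareholders", "annual report", "message from"],
-- }
--
-- def classify_link(text, href):
--     """Classify a link by its text and URL. Returns (page_type, confidence)."""
--     text_lower = (text or "").lower().strip()
--     href_lower = (href or "").lower()
--     # Pass 1: a text match always scores 3 and dominates; first type in order wins.
--     for ptype, keywords in CORPORATE_KEYWORDS.items():
--         if any(kw in text_lower for kw in keywords):
--             return ptype, 3
--     # Pass 2: otherwise a URL match scores 2; first type in order wins.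
--     for ptype, keywords in CORPORATE_KEYWORDS.items():
--         if any(kw in href_lower for kw in keywords):
--             return ptype, 2
--     return None, 0
-- ===== Notes on version B (the rewrite author's own statement) =====
-- stated objective: simpler
-- what changed: Replaces A's single pass tracking the best (type, score) across all keyword lists with two prioritized early-return scans: first type (in dict order) with a keyword in the link text returns (type, 3), else first with a keyword in the href returns (type, 2), else (None, 0).
import Mathlib
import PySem

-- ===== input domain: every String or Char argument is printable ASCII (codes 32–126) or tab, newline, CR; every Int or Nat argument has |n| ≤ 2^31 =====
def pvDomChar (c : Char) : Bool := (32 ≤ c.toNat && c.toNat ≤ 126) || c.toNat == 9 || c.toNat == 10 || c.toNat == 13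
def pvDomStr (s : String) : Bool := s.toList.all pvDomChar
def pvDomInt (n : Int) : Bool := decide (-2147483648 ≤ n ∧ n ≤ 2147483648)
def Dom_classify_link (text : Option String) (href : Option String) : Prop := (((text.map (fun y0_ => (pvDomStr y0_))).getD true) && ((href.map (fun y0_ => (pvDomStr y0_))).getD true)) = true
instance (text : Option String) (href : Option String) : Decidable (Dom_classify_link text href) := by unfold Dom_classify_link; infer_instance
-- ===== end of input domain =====

-- B replaces A's best-score-tracking double loop with two prioritized early-return passes (text matches score 3 and dominate, then href matches score 2); objective: simpler.

-- the CORPORATE_KEYWORDS dict (distinct keys, so its items in insertion order)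
def pvKW : List (String × List String) :=
  [("sustainability", ["sustainability", "sustainable", "esg", "environment", "climate", "carbon", "impact", "responsibility", "responsible", "csr", "social impact"]),
   ("investor-relations", ["investor", "investors", "shareholder", "annual report", "financial", "earnings", "ir "]),
   ("newsroom", ["newsroom", "press", "media", "press release", "news room", "news"]),
   ("values", ["values", "purpose", "mission", "culture", "principles", "commitment", "our purpose"]),
   ("about", ["about", "our story", "who we are", "our company", "company overview", "history", "company profile"]),
   ("leadership", ["leadership", "team", "executives", "management", "board", "directors", "our people", "our management"]),
   ("careers", ["careers", "jobs", "join us", "work with us", "life at", "hiring"]),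
   ("ceo-letter", ["ceo", "chairman", "letter to shareholders", "annual report", "message from"])]

-- ===== PORT A =====
-- inner loop body: per-keyword score and best-update
def pvStepKw (tl hl p : String) (bst : Option String × Int) (kw : String) : Option String × Int :=
  let score : Int := if PySem.Str.isIn kw tl then 3 else if PySem.Str.isIn kw hl then 2 else 0
  if score > bst.2 then (some p, score) else bst

-- outer loop body: run the inner keyword loop of one dict entry
def pvStepEntry (tl hl : String) (bst : Option String × Int) (e : String × List String) : Option String × Int :=
  e.2.foldl (pvStepKw tl hl e.1) bst

def classify_link (text : Option String) (href : Option String) : Option String × Int :=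
  let tl := PySem.Str.strip (PySem.Str.lower (text.getD ""))
  let hl := PySem.Str.lower (href.getD "")
  pvKW.foldl (pvStepEntry tl hl) (none, 0)

-- ===== PORT B =====
-- first dict entry (in order) with a keyword contained in hay
def pvFirstMatch (hay : String) : List (String × List String) → Option String
  | [] => none
  | (p, kws) :: rest =>
      if kws.any (fun kw => PySem.Str.isIn kw hay) then some p else pvFirstMatch hay rest

def classify_link_alt (text : Option String) (href : Option String) : Option String × Int :=
  let tl := PySem.Str.strip (PySem.Str.lower (text.getD ""))
  let hl := PySem.Str.lower (href.getD "")
  match pvFirstMatch tl pvKW with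
  | some p => (some p, 3)
  | none =>
    match pvFirstMatch hl pvKW with
    | some p => (some p, 2)
    | none => (none, 0)

-- ===== PRECONDITION & SPEC =====
def Spec_classify_link (text : Option String) (href : Option String) (out : Option String × Int) : Prop := out = classify_link_alt text href
instance (text : Option String) (href : Option String) (out : Option String × Int) : Decidable (Spec_classify_link text href out) := by unfold Spec_classify_link; infer_instance

-- ===== CLAIM (what is proved, stated in full; the proofs are below) =====
def Claim_equal_classify_link : Prop := ∀ (text : Option String) (href : Option String), Dom_classify_link text href → Spec_classify_link text href (classify_link text href)

-- ===== LEMMAS AND PROOFS =====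

-- A's inner keyword loop, characterized: from a reachable score (0, 2 or 3) it yields 3 on a
-- text match (unless already at 3), else keeps a 2, else yields 2 on a href match.
lemma pvInner_char (tl hl p : String) (kws : List String) (bt : Option String) (bs : Int)
    (h : bs = 0 ∨ bs = 2 ∨ bs = 3) :
    kws.foldl (pvStepKw tl hl p) (bt, bs) =
      (if bs = 3 then (bt, 3)
       else if kws.any (fun kw => PySem.Str.isIn kw tl) then (some p, 3)
       else if bs = 2 then (bt, 2)
       else if kws.any (fun kw => PySem.Str.isIn kw hl) then (some p, 2)
       else (bt, 0)) := by
  induction kws generalizing bt bs with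
  | nil => rcases h with h|h|h <;> subst h <;> simp
  | cons kw rest ih =>
    by_cases htm : PySem.Str.isIn kw tl = true <;>
    by_cases hhm : PySem.Str.isIn kw hl = true <;>
    rcases h with h|h|h <;> subst h <;>
    simp only [List.foldl_cons, List.any_cons, pvStepKw, htm, hhm, Bool.true_or,
      Bool.false_or, if_true] <;>
    norm_num <;>
    first
      | (rw [ih _ 3 (by omega)]; norm_num)
      | (rw [ih _ 2 (by omega)]; norm_num)
      | (rw [ih _ 0 (by omega)]; norm_num)

-- A's outer loop, characterized via B's first-match scans.
lemma pvOuter_char (tl hl : String) (entries : List (String × List String)) (bt : Option String) (bs : Int)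
    (h : bs = 0 ∨ bs = 2 ∨ bs = 3) :
    entries.foldl (pvStepEntry tl hl) (bt, bs) =
      (if bs = 3 then ((bt, 3) : Option String × Int)
       else match pvFirstMatch tl entries with
       | some p => ((some p, 3) : Option String × Int)
       | none =>
          if bs = 2 then ((bt, 2) : Option String × Int)
          else match pvFirstMatch hl entries with
          | some p => ((some p, 2) : Option String × Int)
          | none => ((bt, 0) : Option String × Int)) := by
  induction entries generalizing bt bs with
  | nil => rcases h with h|h|h <;> subst h <;> simp [pvFirstMatch]
  | cons e rest ih =>
    obtain ⟨p, kws⟩ := e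
    rcases h with h|h|h <;> subst h <;>
    simp only [List.foldl_cons, pvStepEntry] <;>
    rw [pvInner_char tl hl p kws _ _ (by omega)] <;>
    by_cases htm : (kws.any fun kw => PySem.Str.isIn kw tl) = true <;>
    by_cases hhm : (kws.any fun kw => PySem.Str.isIn kw hl) = true <;>
    simp only [pvFirstMatch, htm, hhm, if_true] <;>
    norm_num <;>
    first
      | rfl
      | (rw [ih _ 3 (by omega)]; norm_num)
      | (rw [ih _ 2 (by omega)]; norm_num)
      | (rw [ih _ 0 (by omega)]; norm_num)

-- ===== VERDICT (by name: the statement is the Claim_ definition above) =====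
theorem classify_link_spec : Claim_equal_classify_link := by
  intro text href _
  unfold Spec_classify_link classify_link classify_link_alt
  rw [pvOuter_char _ _ _ _ _ (by omega)]
  norm_num
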